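-- pv_equiv track=rewrite | github.com/anusambath/Protocol2USDM-Agentic | extraction/execution/execution_model_promoter.py | _find_first_treatment_epoch_id
-- ===== SOURCE A (Python) =====
-- from typing import Dict, List, Optional, Any, Set, Tuple
--
-- def _find_first_treatment_epoch_id(design: Dict[str, Any]) -> Optional[str]:
--     """Find the first treatment epoch ID."""
--     for epoch in design.get('epochs', []):
--         name = epoch.get('name', '').lower()
--         if any(kw in name for kw in ['treatment', 'period 1', 'day 1', 'inpatient']):
--             return epoch['id']
--
--     # Skip screening, use first non-screening
--     for epoch in design.get('epochs', []):
--         if 'screen' not in epoch.get('name', '').lower():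
--             return epoch['id']
--
--     if design.get('epochs'):
--         return design['epochs'][0]['id']
--
--     return None
-- ===== SOURCE B (Python) =====
-- def _find_first_treatment_epoch_id(design):
--     """Find the first treatment epoch ID by ranking every epoch and taking the stable minimum."""
--     epochs = design.get('epochs', [])
--     if not epochs:
--         return None
--
--     def rank(epoch):
--         name = epoch.get('name', '').lower()
--         if any(kw in name for kw in ('treatment', 'period 1', 'day 1', 'inpatient')):
--             return 0
--         return 1 if 'screen' not in name else 2
--
--     return min(epochs, key=rank)['id']
-- ===== Notes on version B (the rewrite author's own statement) =====
-- stated objective: alternative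
-- what changed: A's two staged scans plus fallback are replaced by ranking every epoch (treatment=0, non-screening=1, other=2) and taking the stable minimum with min(epochs, key=rank), whose first-minimal tie-breaking reproduces A's priority order.
-- outside the precondition, e.g. on _find_first_treatment_epoch_id({'epochs': [{'name': 'treatment', 'id': 'e1'}, {'name': 'x'}]}): A returns 'e1', B returns 'e1'
import Mathlib
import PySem

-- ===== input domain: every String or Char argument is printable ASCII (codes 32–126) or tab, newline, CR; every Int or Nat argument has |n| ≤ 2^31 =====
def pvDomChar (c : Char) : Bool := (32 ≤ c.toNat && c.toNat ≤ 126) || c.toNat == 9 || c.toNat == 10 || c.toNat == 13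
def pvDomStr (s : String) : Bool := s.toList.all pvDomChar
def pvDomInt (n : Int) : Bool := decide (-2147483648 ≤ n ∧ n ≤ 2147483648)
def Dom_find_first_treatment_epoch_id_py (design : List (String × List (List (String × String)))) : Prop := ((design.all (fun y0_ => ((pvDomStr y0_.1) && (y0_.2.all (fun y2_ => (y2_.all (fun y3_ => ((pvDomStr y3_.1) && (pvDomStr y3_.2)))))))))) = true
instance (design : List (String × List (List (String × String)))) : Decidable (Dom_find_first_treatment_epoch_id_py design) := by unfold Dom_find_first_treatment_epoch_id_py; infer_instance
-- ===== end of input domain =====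

-- B replaces A's two staged scans (treatment keyword, then non-screening, then first epoch) by ranking each
-- epoch 0/1/2 and taking the stable minimum (min with key): an alternative algorithm, same values.

-- dict.get(k, dflt) on an association list: first match (exact for Python dicts, modelled as assoc lists)
def pvGetD {α : Type} (d : List (String × α)) (k : String) (dflt : α) : α :=
  match d with
  | [] => dflt
  | (k', v) :: rest => if k' == k then v else pvGetD rest k dflt

-- ===== PORT A =====
def pvKws : List String := ["treatment", "period 1", "day 1", "inpatient"]

-- first loop of A: return epoch['id'] of the first epoch whose lowered name contains a treatment keyword
def pvLoop1 : List (List (String × String)) → Option String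
  | [] => none
  | e :: rest =>
    let name := PySem.Str.lower (pvGetD e "name" "")
    if pvKws.any (fun kw => PySem.Str.isIn kw name) then some (pvGetD e "id" "")
    else pvLoop1 rest

-- second loop of A: return epoch['id'] of the first epoch whose lowered name does not contain 'screen'
def pvLoop2 : List (List (String × String)) → Option String
  | [] => none
  | e :: rest =>
    if !(PySem.Str.isIn "screen" (PySem.Str.lower (pvGetD e "name" ""))) then some (pvGetD e "id" "")
    else pvLoop2 rest

def find_first_treatment_epoch_id_py (design : List (String × List (List (String × String)))) : Option String :=
  let epochs := pvGetD design "epochs" []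
  match pvLoop1 epochs with
  | some r => some r
  | none =>
    match pvLoop2 epochs with
    | some r => some r
    | none =>
      match epochs with
      | [] => none
      | e :: _ => some (pvGetD e "id" "")

-- ===== PORT B =====
-- rank(epoch) from Source B: 0 = treatment keyword, 1 = non-screening, 2 = otherwise
def pvRank (e : List (String × String)) : Nat :=
  let name := PySem.Str.lower (pvGetD e "name" "")
  if pvKws.any (fun kw => PySem.Str.isIn kw name) then 0
  else if !(PySem.Str.isIn "screen" name) then 1 else 2

def find_first_treatment_epoch_id_py_alt (design : List (String × List (List (String × String)))) : Option String :=
  let epochs := pvGetD design "epochs" []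
  if epochs.isEmpty then none
  else
    match PySem.List.min? epochs pvRank with
    | some e => some (pvGetD e "id" "")
    | none => none

-- ===== PRECONDITION & SPEC =====
-- Pre_ excludes designs in which some epoch lacks an 'id' key: on those A can raise KeyError; it conservatively
-- also excludes designs where only a never-returned epoch lacks 'id' (on which A and B both return normally).
def Pre_find_first_treatment_epoch_id_py (design : List (String × List (List (String × String)))) : Prop :=
  ∀ p ∈ design, p.1 = "epochs" → ∀ e ∈ p.2, e.any (fun q => q.1 == "id") = true
instance (design : List (String × List (List (String × String)))) : Decidable (Pre_find_first_treatment_epoch_id_py design) := by unfold Pre_find_first_treatment_epoch_id_py; infer_instance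

def pvWitness_find_first_treatment_epoch_id_py : (List (String × List (List (String × String)))) :=
  [("epochs", [[("name", "Screening"), ("id", "e0")], [("name", "Treatment A"), ("id", "e1")]])]

def Spec_find_first_treatment_epoch_id_py (design : List (String × List (List (String × String)))) (out : Option String) : Prop := out = find_first_treatment_epoch_id_py_alt design
instance (design : List (String × List (List (String × String)))) (out : Option String) : Decidable (Spec_find_first_treatment_epoch_id_py design out) := by unfold Spec_find_first_treatment_epoch_id_py; infer_instance

-- ===== CLAIM (what is proved, stated in full; the proofs are below) =====
def Claim_equal_find_first_treatment_epoch_id_py : Prop := ∀ (design : List (String × List (List (String × String)))), Dom_find_first_treatment_epoch_id_py design → Pre_find_first_treatment_epoch_id_py design → Spec_find_first_treatment_epoch_id_py design (find_first_treatment_epoch_id_py design)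

-- ===== LEMMAS AND PROOFS =====

-- proof-only helpers: the two scans of A returning the epoch itself rather than its id
def pvL1 : List (List (String × String)) → Option (List (String × String))
  | [] => none
  | e :: rest =>
    if pvKws.any (fun kw => PySem.Str.isIn kw (PySem.Str.lower (pvGetD e "name" ""))) then some e
    else pvL1 rest

def pvL2 : List (List (String × String)) → Option (List (String × String))
  | [] => none
  | e :: rest =>
    if !(PySem.Str.isIn "screen" (PySem.Str.lower (pvGetD e "name" ""))) then some e
    else pvL2 rest

theorem pvLoop1_eq (epochs : List (List (String × String))) :
    pvLoop1 epochs = (pvL1 epochs).map (fun e => pvGetD e "id" "") := by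
  induction epochs with
  | nil => rfl
  | cons e rest ih => simp only [pvLoop1, pvL1]; split_ifs <;> simp [ih]

theorem pvLoop2_eq (epochs : List (List (String × String))) :
    pvLoop2 epochs = (pvL2 epochs).map (fun e => pvGetD e "id" "") := by
  induction epochs with
  | nil => rfl
  | cons e rest ih => simp only [pvLoop2, pvL2]; split_ifs <;> simp [ih]

-- the running "first minimal so far" of the min? fold
def pvPick : List (List (String × String)) → List (String × String) → List (String × String)
  | [], m => m
  | x :: t, m => if pvRank x < pvRank m then pvPick t x else pvPick t m

theorem min?_cons (e : List (String × String)) (rest : List (List (String × String))) :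
    PySem.List.min? (e :: rest) pvRank = some (pvPick rest e) := by
  induction rest generalizing e with
  | nil => rfl
  | cons x t ih =>
    have h : PySem.List.min? (e :: x :: t) pvRank
        = PySem.List.min? ((if pvRank x < pvRank e then x else e) :: t) pvRank := by
      simp only [PySem.List.min?, List.foldl]; split_ifs <;> rfl
    rw [h, ih]
    simp only [pvPick]; split_ifs <;> rfl

-- the first minimal-rank element is exactly A's selection order
theorem pick_spec (t : List (List (String × String))) (m : List (String × String)) :
    pvPick t m =
      match pvL1 (m :: t) with
      | some e => e
      | none =>
        match pvL2 (m :: t) with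
        | some e => e
        | none => m := by
  induction t generalizing m with
  | nil =>
    simp only [pvPick, pvL1, pvL2]
    split_ifs <;> rfl
  | cons x t ih =>
    simp only [pvPick]
    by_cases hkm : pvKws.any (fun kw => PySem.Str.isIn kw (PySem.Str.lower (pvGetD m "name" ""))) = true <;>
    by_cases hkx : pvKws.any (fun kw => PySem.Str.isIn kw (PySem.Str.lower (pvGetD x "name" ""))) = true <;>
    by_cases hsm : PySem.Str.isIn "screen" (PySem.Str.lower (pvGetD m "name" "")) = true <;>
    by_cases hsx : PySem.Str.isIn "screen" (PySem.Str.lower (pvGetD x "name" "")) = true <;>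
      simp only [pvRank, pvL1, pvL2, hkm, hkx, hsm, hsx, ih, Bool.not_true, Bool.not_false, if_pos] <;>
      norm_num

-- ===== VERDICT (by name: the statement is the Claim_ definition above) =====
theorem find_first_treatment_epoch_id_py_spec : Claim_equal_find_first_treatment_epoch_id_py := by
  intro design _ _
  unfold Spec_find_first_treatment_epoch_id_py
  simp only [find_first_treatment_epoch_id_py, find_first_treatment_epoch_id_py_alt,
    pvLoop1_eq, pvLoop2_eq]
  cases hep : pvGetD design "epochs" ([] : List (List (String × String))) with
  | nil => rfl
  | cons e rest =>
    simp only [List.isEmpty_cons, min?_cons, pick_spec, if_false, Bool.false_eq_true]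
    cases h1 : pvL1 (e :: rest) with
    | some c => simp
    | none =>
      cases h2 : pvL2 (e :: rest) with
      | some c => simp
      | none => simp
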